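-- pv_equiv track=rewrite | github.com/tamaramalysh5991/rep-python-camp | Day5/task2.py | search_lines
-- ===== SOURCE A (Python) =====
-- def search_lines(pattern, lines):
--     """Funcrion return search results from standard input.
--     Args:
--         pattern(string) - Word used for search.
--         lines(list)- Rows.
--     Return:
--         list: rows with an occurrence pattern.
--     Yields:
--         int: line_count - count of occurrence.
--         int: all_processed - total processed rows
--     """
--     lines = iter(lines)
--     encounters = 0
--     all_processed = 0
--     find_rows = []
--     for line in lines:
--         if pattern in line:
--             for in_line in line.split():
--                 if pattern in in_line:
--                     encounters += 1
--             find_rows.append(line)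
--         all_processed += 1
--     find_rows = ('\n'.join(find_rows))
--     yield (encounters, all_processed, find_rows)
-- ===== SOURCE B (Python) =====
-- def search_lines(pattern, lines):
--     """Build the joined result first, then count matching tokens in it.
--
--     Correct because '\n' is whitespace, so joined.split() is exactly the
--     concatenation of each matching line's split() token list."""
--     lines = list(lines)
--     joined = '\n'.join(l for l in lines if pattern in l)
--     encounters = len([w for w in joined.split() if pattern in w])
--     yield (encounters, len(lines), joined)
-- ===== Notes on version B (the rewrite author's own statement) =====
-- stated objective: alternative
-- what changed: A fuses everything in one loop with a nested per-line word loop; B first builds the joined output string from the filtered lines and then obtains encounters by tokenizing that single joined text once (correct since '\n' is whitespace, so split() of the join is the concatenation of the per-line splits), with len() for the total.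
import Mathlib
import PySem

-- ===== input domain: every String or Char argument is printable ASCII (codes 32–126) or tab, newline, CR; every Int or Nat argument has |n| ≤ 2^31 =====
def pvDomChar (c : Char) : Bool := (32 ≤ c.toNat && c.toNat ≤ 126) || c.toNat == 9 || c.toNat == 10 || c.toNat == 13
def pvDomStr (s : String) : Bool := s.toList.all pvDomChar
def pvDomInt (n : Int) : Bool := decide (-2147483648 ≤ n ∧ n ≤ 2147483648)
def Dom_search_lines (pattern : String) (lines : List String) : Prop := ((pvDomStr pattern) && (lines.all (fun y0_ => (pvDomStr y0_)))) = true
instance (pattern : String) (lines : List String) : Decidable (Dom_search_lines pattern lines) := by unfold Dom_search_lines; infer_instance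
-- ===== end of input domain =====

-- B builds the joined output first and counts matching tokens of that single joined text
-- (valid since '\n' is whitespace), replacing A's fused loop with its nested word loop; objective: alternative.

-- ===== PORT A =====
-- one fused loop over the lines carrying (encounters, all_processed, find_rows)
def stepA (pattern : String) (st : Int × Int × List String) (line : String) : Int × Int × List String :=
  if PySem.Str.isIn pattern line then
    (st.1 + (PySem.Str.split₀ line).foldl
        (fun e w => if PySem.Str.isIn pattern w then e + 1 else e) 0,
     st.2.1 + 1, st.2.2 ++ [line])
  else (st.1, st.2.1 + 1, st.2.2)

def search_lines (pattern : String) (lines : List String) : List (Int × Int × String) :=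
  let st := lines.foldl (stepA pattern) (0, 0, [])
  [(st.1, st.2.1, PySem.Str.join "\n" st.2.2)]

-- ===== PORT B =====
-- join the filtered lines first, then count the matching tokens of the joined text
def search_lines_alt (pattern : String) (lines : List String) : List (Int × Int × String) :=
  let joined := PySem.Str.join "\n" (lines.filter (fun l => PySem.Str.isIn pattern l))
  let encounters : Int :=
    (((PySem.Str.split₀ joined).filter (fun w => PySem.Str.isIn pattern w)).length : Int)
  [(encounters, (lines.length : Int), joined)]

-- ===== PRECONDITION & SPEC =====
def Spec_search_lines (pattern : String) (lines : List String) (out : List (Int × Int × String)) : Prop := out = search_lines_alt pattern lines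
instance (pattern : String) (lines : List String) (out : List (Int × Int × String)) : Decidable (Spec_search_lines pattern lines out) := by unfold Spec_search_lines; infer_instance

-- ===== CLAIM =====
def Claim_equal_search_lines : Prop := ∀ (pattern : String) (lines : List String), Dom_search_lines pattern lines → Spec_search_lines pattern lines (search_lines pattern lines)

-- ===== LEMMAS AND PROOFS =====

-- A's inner word loop is a countP
theorem inner_count (pattern : String) (ws : List String) (e : Int) :
    ws.foldl (fun e w => if PySem.Str.isIn pattern w then e + 1 else e) e
      = e + (ws.countP (fun w => PySem.Str.isIn pattern w) : Int) :=
  PySem.List.foldl_if_add_one _ _ _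

-- A's fused loop, characterized
theorem fold_inv (pattern : String) (lines : List String) (enc ap : Int) (rows : List String) :
    lines.foldl (stepA pattern) (enc, ap, rows)
    = (enc + ((lines.filter (fun line => PySem.Str.isIn pattern line)).map (fun line =>
          ((PySem.Str.split₀ line).countP (fun w => PySem.Str.isIn pattern w) : Int))).sum,
       ap + lines.length,
       rows ++ lines.filter (fun line => PySem.Str.isIn pattern line)) := by
  induction lines generalizing enc ap rows with
  | nil => simp
  | cons l ls ih =>
    by_cases h : PySem.Str.isIn pattern l = true
    · rw [List.foldl_cons,
        show stepA pattern (enc, ap, rows) l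
          = (enc + (PySem.Str.split₀ l).foldl
              (fun e w => if PySem.Str.isIn pattern w then e + 1 else e) 0,
             ap + 1, rows ++ [l]) from by
          simp only [stepA, h, if_true],
        ih, inner_count, List.filter_cons_of_pos h]
      refine Prod.ext ?_ (Prod.ext ?_ ?_)
      · simp only [List.map_cons, List.sum_cons]; ring
      · simp only [List.length_cons]; push_cast; ring
      · simp only [List.append_assoc, List.singleton_append]
    · rw [List.foldl_cons,
        show stepA pattern (enc, ap, rows) l = (enc, ap + 1, rows) from by
          rw [Bool.not_eq_true] at h
          simp only [stepA, h, Bool.false_eq_true, if_false],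
        ih, List.filter_cons_of_neg h]
      refine Prod.ext ?_ (Prod.ext ?_ ?_)
      · rfl
      · simp only [List.length_cons]; push_cast; ring
      · rfl

-- split₀.go only prepends acc.reverse
theorem go_acc (s cur : List Char) (acc : List (List Char)) :
    PySem.Chars.split₀.go s cur acc = acc.reverse ++ PySem.Chars.split₀.go s cur [] := by
  induction s generalizing cur acc with
  | nil =>
    by_cases h : cur.isEmpty = true <;>
      simp [PySem.Chars.split₀.go, h]
  | cons c rest ih =>
    by_cases hs : PySem.Chars.isspace c = true
    · by_cases h : cur.isEmpty = true
      · simp only [PySem.Chars.split₀.go, hs, h, if_true]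
        exact ih [] acc
      · simp only [PySem.Chars.split₀.go, hs, h, if_true, Bool.false_eq_true, if_false]
        rw [ih [] (cur.reverse :: acc), ih [] [cur.reverse]]
        simp
    · simp only [PySem.Chars.split₀.go, hs, Bool.false_eq_true, if_false]
      exact ih (c :: cur) acc

-- splitting at a whitespace character splits the split
theorem go_split_at_space (c : Char) (hc : PySem.Chars.isspace c = true)
    (a b cur : List Char) (acc : List (List Char)) :
    PySem.Chars.split₀.go (a ++ c :: b) cur acc
      = PySem.Chars.split₀.go a cur acc ++ PySem.Chars.split₀.go b [] [] := by
  induction a generalizing cur acc with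
  | nil =>
    by_cases h : cur.isEmpty = true
    · simp only [List.nil_append, PySem.Chars.split₀.go, hc, h, if_true]
      rw [go_acc b [] acc]
    · simp only [List.nil_append, PySem.Chars.split₀.go, hc, h, if_true, Bool.false_eq_true, if_false]
      rw [go_acc b [] (cur.reverse :: acc)]
  | cons x a' ih =>
    by_cases hs : PySem.Chars.isspace x = true
    · by_cases h : cur.isEmpty = true <;>
        simp only [List.cons_append, PySem.Chars.split₀.go, hs, h, if_true,
          Bool.false_eq_true, if_false] <;> exact ih _ _
    · simp only [List.cons_append, PySem.Chars.split₀.go, hs, Bool.false_eq_true, if_false]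
      exact ih _ _

theorem split₀_append_newline (a b : List Char) :
    PySem.Chars.split₀ (a ++ '\n' :: b)
      = PySem.Chars.split₀ a ++ PySem.Chars.split₀ b := by
  simpa [PySem.Chars.split₀] using
    go_split_at_space '\n' (by decide) a b [] []

-- split() of a '\n'-join is the concatenation of the splits
theorem split₀_join (parts : List (List Char)) :
    PySem.Chars.split₀ (PySem.Chars.join ['\n'] parts)
      = parts.flatMap PySem.Chars.split₀ := by
  induction parts with
  | nil => simp [PySem.Chars.join, List.intercalate, PySem.Chars.split₀, PySem.Chars.split₀.go]
  | cons p ps ih =>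
    cases ps with
    | nil => simp [PySem.Chars.join, List.intercalate]
    | cons q qs =>
      have hj : PySem.Chars.join ['\n'] (p :: q :: qs)
          = p ++ '\n' :: PySem.Chars.join ['\n'] (q :: qs) := by
        simp [PySem.Chars.join, List.intercalate]
      rw [hj, split₀_append_newline, ih]
      simp [List.flatMap_cons]

-- ===== VERDICT =====
theorem search_lines_spec : Claim_equal_search_lines := by
  intro pattern lines _
  show _ = _
  simp only [search_lines, search_lines_alt, fold_inv]
  refine congrArg (fun t => [t]) (Prod.ext ?_ (Prod.ext (by push_cast; ring) rfl))
  -- encounters: count over the joined text = sum of per-line counts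
  show (0 : Int) + _ = _
  rw [zero_add]
  simp only [PySem.Str.split₀, PySem.Str.join]
  rw [show (String.ofList (PySem.Chars.join "\n".toList
        (List.map String.toList (lines.filter fun l => PySem.Str.isIn pattern l)))).toList
      = PySem.Chars.join ['\n'] (List.map String.toList (lines.filter fun l => PySem.Str.isIn pattern l)) from by
    simp,
    split₀_join]
  induction lines.filter (fun l => PySem.Str.isIn pattern l) with
  | nil => simp
  | cons m ms ih =>
    simp only [List.map_cons, List.flatMap_cons, List.map_append, List.filter_append,
      List.length_append, List.sum_cons]
    push_cast
    rw [← ih]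
    have : ∀ cs : List (List Char),
        ((cs.map String.ofList).filter (fun w => PySem.Str.isIn pattern w)).length
          = (cs.map String.ofList).countP (fun w => PySem.Str.isIn pattern w) := by
      intro cs; rw [List.countP_eq_length_filter]
    rw [this]
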